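-- pv_equiv track=rewrite | github.com/JanGospodarek/matury-infa-praktyczne | 2016-maj/praktyka/zadanie6.py | dekoduj
-- ===== SOURCE A (Python) =====
-- def dekoduj(zaszyfrowane,klucz):
--     rozszyfrowane=""
--     for i in zaszyfrowane:
--         litera=-klucz+ord(i)
--         while litera>ord('Z')+1 or litera<ord('A'):
--             if litera > ord('Z'):
--                 litera -= 26
--             elif litera < ord('A'):
--                 litera += 26
--         rozszyfrowane+=chr(litera)
--     return rozszyfrowane
-- ===== SOURCE B (Python) =====
-- def dekoduj(zaszyfrowane, klucz):
--     return "".join(chr(65 + (ord(ch) - klucz - 65) % 26) for ch in zaszyfrowane)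
-- ===== Notes on version B (the rewrite author's own statement) =====
-- stated objective: faster
-- what changed: Replaces the per-character while-loop that repeatedly adds/subtracts 26 with a single O(1) modular-arithmetic formula (join over a generator instead of string concatenation).
-- intended difference: On inputs containing a character whose shifted code ord(c)-klucz is >= 91 and congruent to 65 mod 26, A's off-by-one loop condition (ord('Z')+1) lets the value stop at 91 and A outputs '[' there, while B wraps it to 'A', the intended uppercase letter. — e.g. on dekoduj("A", -26): A returns "[", B returns "A"
import Mathlib
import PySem

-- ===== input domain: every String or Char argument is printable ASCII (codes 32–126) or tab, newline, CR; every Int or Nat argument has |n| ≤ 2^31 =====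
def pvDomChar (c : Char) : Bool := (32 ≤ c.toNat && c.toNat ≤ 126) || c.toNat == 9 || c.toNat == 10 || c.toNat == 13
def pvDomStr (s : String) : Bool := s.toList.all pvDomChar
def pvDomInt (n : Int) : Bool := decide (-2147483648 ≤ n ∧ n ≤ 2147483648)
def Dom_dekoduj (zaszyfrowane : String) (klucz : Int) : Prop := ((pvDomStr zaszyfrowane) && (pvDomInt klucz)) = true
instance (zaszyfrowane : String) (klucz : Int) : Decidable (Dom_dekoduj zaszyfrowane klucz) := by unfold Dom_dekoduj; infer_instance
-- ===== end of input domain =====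

-- B replaces A's per-character normalization while-loop by one O(1) mod-26 formula (objective: faster); on the 91-boundary inputs described at D_ below, B returns the intended letter where A returns '['.


-- ===== PORT A =====
-- A's while-loop: while litera > 91 or litera < 65: if litera > 90: litera -= 26 elif litera < 65: litera += 26
-- (when litera > 91 the first branch fires, since litera > 91 → litera > 90; otherwise litera < 65 and the elif fires).
-- The loop is run with explicit fuel = (l-91)⁺ + (65-l)⁺, an exact upper bound on its iteration count
-- (each iteration moves l by 26 towards [65, 91]), so the port computes exactly what the while-loop computes.
def normAFuel (n : Nat) (l : Int) : Int :=
  match n with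
  | 0 => l
  | n + 1 =>
      if 91 < l then normAFuel n (l - 26)
      else if l < 65 then normAFuel n (l + 26)
      else l

def normA (l : Int) : Int := normAFuel ((l - 91).toNat + (65 - l).toNat) l

def dekoduj (zaszyfrowane : String) (klucz : Int) : String :=
  String.ofList (zaszyfrowane.toList.foldl
    (fun acc c => acc ++ [Char.ofNat (normA (-klucz + (c.toNat : Int))).toNat]) [])

-- ===== PORT B =====
-- Source B: "".join(chr(65 + (ord(ch) - klucz - 65) % 26) for ch in zaszyfrowane)
def dekoduj_alt (zaszyfrowane : String) (klucz : Int) : String :=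
  String.ofList (zaszyfrowane.toList.map
    (fun c => Char.ofNat (65 + PySem.Int.mod ((c.toNat : Int) - klucz - 65) 26).toNat))

-- ===== PRECONDITION & SPEC =====
-- On inputs containing a character whose shifted code ord(c)-klucz is ≥ 91 and ≡ 65 (mod 26), A's
-- off-by-one loop condition (ord('Z')+1) lets the value stop at 91 and A outputs '[' there, while B
-- wraps it to 'A', the intended uppercase letter.
def D_dekoduj (zaszyfrowane : String) (klucz : Int) : Prop :=
  ∃ c ∈ zaszyfrowane.toList, 91 ≤ (c.toNat : Int) - klucz ∧ ((c.toNat : Int) - klucz - 65) % 26 = 0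
instance (zaszyfrowane : String) (klucz : Int) : Decidable (D_dekoduj zaszyfrowane klucz) := by
  unfold D_dekoduj; infer_instance

def Spec_dekoduj (zaszyfrowane : String) (klucz : Int) (out : String) : Prop :=
  ¬ D_dekoduj zaszyfrowane klucz → out = dekoduj_alt zaszyfrowane klucz
instance (zaszyfrowane : String) (klucz : Int) (out : String) : Decidable (Spec_dekoduj zaszyfrowane klucz out) := by unfold Spec_dekoduj; infer_instance

def pvDiffWitness_dekoduj : String × Int := ("A", -26)
def pvDiffWitnessOut_dekoduj : String × String := ("[", "A")

-- ===== CLAIM (what is proved, stated in full; the proofs are below) =====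
def Claim_unchanged_dekoduj : Prop := ∀ (zaszyfrowane : String) (klucz : Int), Dom_dekoduj zaszyfrowane klucz → Spec_dekoduj zaszyfrowane klucz (dekoduj zaszyfrowane klucz)
def Claim_changed_dekoduj : Prop := Dom_dekoduj (pvDiffWitness_dekoduj.1) (pvDiffWitness_dekoduj.2) ∧ D_dekoduj (pvDiffWitness_dekoduj.1) (pvDiffWitness_dekoduj.2) ∧ dekoduj (pvDiffWitness_dekoduj.1) (pvDiffWitness_dekoduj.2) = pvDiffWitnessOut_dekoduj.1 ∧ dekoduj_alt (pvDiffWitness_dekoduj.1) (pvDiffWitness_dekoduj.2) = pvDiffWitnessOut_dekoduj.2 ∧ pvDiffWitnessOut_dekoduj.1 ≠ pvDiffWitnessOut_dekoduj.2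
def Claim_exact_dekoduj : Prop := ∀ (zaszyfrowane : String) (klucz : Int), Dom_dekoduj zaszyfrowane klucz → D_dekoduj zaszyfrowane klucz → dekoduj zaszyfrowane klucz ≠ dekoduj_alt zaszyfrowane klucz

-- ===== LEMMAS AND PROOFS =====

theorem normAFuel_eq (n : Nat) (l : Int) (h : (l - 91).toNat + (65 - l).toNat ≤ n) :
    normAFuel n l = if (l - 65) % 26 = 0 ∧ 91 ≤ l then 91 else 65 + (l - 65) % 26 := by
  induction n generalizing l with
  | zero =>
      have h65 : 65 ≤ l := by omega
      have h91 : l ≤ 91 := by omega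
      rw [normAFuel]
      split_ifs <;> omega
  | succ n ih =>
      rw [normAFuel]
      by_cases h1 : 91 < l
      · rw [if_pos h1, ih _ (by omega)]
        split_ifs <;> omega
      · rw [if_neg h1]
        by_cases h2 : l < 65
        · rw [if_pos h2, ih _ (by omega)]
          split_ifs <;> omega
        · rw [if_neg h2]
          split_ifs <;> omega

theorem normA_eq (l : Int) :
    normA l = if (l - 65) % 26 = 0 ∧ 91 ≤ l then 91 else 65 + (l - 65) % 26 :=
  normAFuel_eq _ l le_rfl

def charA (klucz : Int) (c : Char) : Char :=
  Char.ofNat (normA (-klucz + (c.toNat : Int))).toNat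

def charB (klucz : Int) (c : Char) : Char :=
  Char.ofNat (65 + PySem.Int.mod ((c.toNat : Int) - klucz - 65) 26).toNat

theorem foldl_app_map (f : Char → Char) (xs : List Char) (acc : List Char) :
    xs.foldl (fun a c => a ++ [f c]) acc = acc ++ xs.map f := by
  induction xs generalizing acc with
  | nil => simp
  | cons x xs ih => simp [List.foldl_cons, ih]

theorem dekoduj_as_map (z : String) (k : Int) :
    dekoduj z k = String.ofList (z.toList.map (charA k)) := by
  unfold dekoduj
  rw [show (fun (acc : List Char) c => acc ++ [Char.ofNat (normA (-k + (c.toNat : Int))).toNat])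
        = (fun a c => a ++ [charA k c]) from rfl,
    foldl_app_map (charA k) z.toList []]
  rfl

theorem charB_mod (k : Int) (c : Char) :
    charB k c = Char.ofNat (65 + ((c.toNat : Int) - k - 65) % 26).toNat := by
  unfold charB
  rw [PySem.Int.mod_eq_emod_of_pos (by norm_num : (0:Int) < 26)]

theorem charA_eq_charB (k : Int) (c : Char)
    (h : ¬ (91 ≤ (c.toNat : Int) - k ∧ ((c.toNat : Int) - k - 65) % 26 = 0)) :
    charA k c = charB k c := by
  unfold charA
  rw [charB_mod]
  have hlit : -k + (c.toNat : Int) = (c.toNat : Int) - k := by ring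
  rw [hlit, normA_eq]
  congr 1
  split_ifs with hc
  · exact absurd ⟨hc.2, hc.1⟩ h
  · rfl

theorem charA_ne_charB (k : Int) (c : Char)
    (h : 91 ≤ (c.toNat : Int) - k ∧ ((c.toNat : Int) - k - 65) % 26 = 0) :
    charA k c ≠ charB k c := by
  unfold charA
  rw [charB_mod]
  have hlit : -k + (c.toNat : Int) = (c.toNat : Int) - k := by ring
  rw [hlit, normA_eq, if_pos ⟨h.2, h.1⟩, h.2]
  decide

-- ===== VERDICT (by name: the statement is the Claim_ definition above) =====
theorem dekoduj_spec : Claim_unchanged_dekoduj := by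
  intro z k _ hD
  rw [dekoduj_as_map]
  show String.ofList (z.toList.map (charA k)) = String.ofList (z.toList.map (charB k))
  congr 1
  apply List.map_congr_left
  intro c hc
  exact charA_eq_charB k c fun hcond => hD ⟨c, hc, hcond⟩

theorem dekoduj_changed : Claim_changed_dekoduj := by
  unfold Claim_changed_dekoduj
  refine ⟨by decide, ⟨'A', by decide, by decide, by decide⟩, by rfl, by rfl, by decide⟩

theorem dekoduj_tight : Claim_exact_dekoduj := by
  intro z k _ hD heq
  obtain ⟨c, hc, hcond⟩ := hD
  rw [dekoduj_as_map] at heq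
  have heq' : String.ofList (z.toList.map (charA k)) = String.ofList (z.toList.map (charB k)) := heq
  have hl : z.toList.map (charA k) = z.toList.map (charB k) := by
    have := congrArg String.toList heq'
    simpa only [String.toList_ofList] using this
  exact charA_ne_charB k c hcond ((List.map_eq_map_iff.mp hl) c hc)
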